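-- pv_equiv track=rewrite | github.com/OPGuy2000/4Dvisor-HackUMBC-2025 | server/src/core.py | pick_courses_for_group
-- ===== SOURCE A (Python) =====
-- def pick_courses_for_group(sorted_courses, min_credits):
--     picked = []
--     total = 0
--     for c in sorted_courses:
--         if total >= min_credits:
--             break
--         picked.append(c)
--         total += c["credits"]
--     return picked, total
-- ===== SOURCE B (Python) =====
-- def pick_courses_for_group(sorted_courses, min_credits):
--     # Build the prefix-sum table first, then find the cutoff index in it.
--     prefix = []
--     s = 0
--     for c in sorted_courses:
--         s += c.get("credits", 0)
--         prefix.append(s)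
--     if min_credits <= 0:
--         return [], 0
--     for i, s in enumerate(prefix):
--         if s >= min_credits:
--             return sorted_courses[:i + 1], s
--     return list(sorted_courses), prefix[-1] if prefix else 0
-- ===== Notes on version B (the rewrite author's own statement) =====
-- stated objective: alternative
-- what changed: B first builds the full prefix-sum table of credits (missing credits counting as 0), then searches that table for the first index reaching the threshold and slices the course list there, instead of A's single accumulate-check-append loop.
import Mathlib
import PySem

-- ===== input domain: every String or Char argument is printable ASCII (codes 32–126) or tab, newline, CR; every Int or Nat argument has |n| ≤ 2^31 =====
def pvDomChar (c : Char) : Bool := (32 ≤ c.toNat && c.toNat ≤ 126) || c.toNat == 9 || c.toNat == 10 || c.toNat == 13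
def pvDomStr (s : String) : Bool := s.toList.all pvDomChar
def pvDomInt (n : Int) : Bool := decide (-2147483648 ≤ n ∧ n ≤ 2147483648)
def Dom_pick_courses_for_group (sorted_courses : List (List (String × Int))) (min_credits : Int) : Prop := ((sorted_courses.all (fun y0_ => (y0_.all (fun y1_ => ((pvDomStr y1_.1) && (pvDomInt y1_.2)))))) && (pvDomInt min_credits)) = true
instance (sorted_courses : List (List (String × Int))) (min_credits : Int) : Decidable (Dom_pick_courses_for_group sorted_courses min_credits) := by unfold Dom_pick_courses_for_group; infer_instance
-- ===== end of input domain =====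

-- B builds the prefix-sum table first and then searches it for the cutoff index (a different
-- decomposition of the same O(n) task); return values are proved equal on Pre_.

-- ===== PORT A =====
-- c["credits"]: first-match association-list lookup; total only under Pre_ (key present)
def pvCredits (c : List (String × Int)) : Int := (c.lookup "credits").getD 0

def pickA_go (min_credits : Int) : List (List (String × Int)) → List (List (String × Int)) → Int → (List (List (String × Int))) × Int
  | [], picked, total => (picked, total)
  | c :: rest, picked, total =>
      if total ≥ min_credits then (picked, total)
      else pickA_go min_credits rest (picked ++ [c]) (total + pvCredits c)

def pick_courses_for_group (sorted_courses : List (List (String × Int))) (min_credits : Int) : (List (List (String × Int))) × Int :=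
  pickA_go min_credits sorted_courses [] 0

-- ===== PORT B =====
-- prefix-sum table (the first loop of Source B)
def pickB_prefix : List (List (String × Int)) → Int → List Int
  | [], _ => []
  | c :: rest, s =>
      let s' := s + pvCredits c
      s' :: pickB_prefix rest s'

-- the enumerate-search loop of Source B
def pickB_scan (courses : List (List (String × Int))) (min_credits : Int) : List Int → Int → Option ((List (List (String × Int))) × Int)
  | [], _ => none
  | s :: rest, i =>
      if s ≥ min_credits then some (PySem.List.slice courses (some 0) (some (i + 1)), s)
      else pickB_scan courses min_credits rest (i + 1)

def pick_courses_for_group_alt (sorted_courses : List (List (String × Int))) (min_credits : Int) : (List (List (String × Int))) × Int :=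
  let pfx := pickB_prefix sorted_courses 0
  if min_credits ≤ 0 then ([], 0)
  else
    match pickB_scan sorted_courses min_credits pfx 0 with
    | some r => r
    | none => (sorted_courses, (pfx.getLast?).getD 0)

-- ===== PRECONDITION & SPEC =====
-- Pre_ excludes the inputs on which Python A raises KeyError: those where a course without a
-- "credits" key sits where the running total is still below the threshold; with negative credits
-- this can also exclude a few inputs past A's stopping point, on which A and B return the same value.
def Pre_pick_courses_for_group (sorted_courses : List (List (String × Int))) (min_credits : Int) : Prop :=
  ∀ (i : Nat) (h : i < sorted_courses.length),
    ((sorted_courses.take i).all (fun c => (c.lookup "credits").isSome)) = true →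
    (sorted_courses.take i).foldl (fun a c => a + pvCredits c) 0 < min_credits →
    ((sorted_courses[i]'h).lookup "credits").isSome = true


instance (sorted_courses : List (List (String × Int))) (min_credits : Int) : Decidable (Pre_pick_courses_for_group sorted_courses min_credits) := by unfold Pre_pick_courses_for_group; infer_instance

def pvWitness_pick_courses_for_group : (List (List (String × Int))) × Int := ([[("credits", 3)], [("credits", 4)]], 5)

def Spec_pick_courses_for_group (sorted_courses : List (List (String × Int))) (min_credits : Int) (out : (List (List (String × Int))) × Int) : Prop := out = pick_courses_for_group_alt sorted_courses min_credits
instance (sorted_courses : List (List (String × Int))) (min_credits : Int) (out : (List (List (String × Int))) × Int) : Decidable (Spec_pick_courses_for_group sorted_courses min_credits out) := by unfold Spec_pick_courses_for_group; infer_instance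

-- ===== CLAIM (what is proved, stated in full; the proofs are below) =====
def Claim_equal_pick_courses_for_group : Prop := ∀ (sorted_courses : List (List (String × Int))) (min_credits : Int), Dom_pick_courses_for_group sorted_courses min_credits → Pre_pick_courses_for_group sorted_courses min_credits → Spec_pick_courses_for_group sorted_courses min_credits (pick_courses_for_group sorted_courses min_credits)

-- ===== LEMMAS AND PROOFS =====

-- A's accumulator only prepends to the picked list
theorem pickA_go_acc (min_credits : Int) (l : List (List (String × Int))) :
    ∀ (p : List (List (String × Int))) (t : Int),
      pickA_go min_credits l p t = (p ++ (pickA_go min_credits l [] t).1, (pickA_go min_credits l [] t).2) := by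
  induction l with
  | nil => intro p t; simp [pickA_go]
  | cons c rest ih =>
      intro p t
      by_cases h : t ≥ min_credits
      · simp [pickA_go, h]
      · simp only [pickA_go, if_neg h]
        rw [ih (p ++ [c]), ih ([] ++ [c])]
        simp

-- first threshold hit in the pfx table, with its index
def firstHit (min_credits : Int) : List Int → Option (Nat × Int)
  | [] => none
  | s :: rest =>
      if s ≥ min_credits then some (0, s)
      else (firstHit min_credits rest).map (fun p => (p.1 + 1, p.2))

theorem pickB_scan_eq_firstHit (courses : List (List (String × Int))) (min_credits : Int) :
    ∀ (pfx : List Int) (i : Int),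
      pickB_scan courses min_credits pfx i =
        (firstHit min_credits pfx).map
          (fun p => (PySem.List.slice courses (some 0) (some (i + (p.1 : Int) + 1)), p.2)) := by
  intro pfx
  induction pfx with
  | nil => intro i; simp [pickB_scan, firstHit]
  | cons s rest ih =>
      intro i
      by_cases h : s ≥ min_credits
      · simp [pickB_scan, firstHit, h]
      · simp only [pickB_scan, if_neg h, firstHit]
        rw [ih (i + 1)]
        cases firstHit min_credits rest with
        | none => simp
        | some p => simp; ring_nf

-- core characterisation of A's loop via the prefix table, for t < min_credits
theorem pickA_stop (min_credits t : Int) (l : List (List (String × Int))) (h : t ≥ min_credits) :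
    pickA_go min_credits l [] t = ([], t) := by
  cases l with
  | nil => rfl
  | cons c rest => simp [pickA_go, h]

theorem lastD_cons (a : Int) (l : List Int) (d : Int) :
    ((a :: l).getLast?).getD d = (l.getLast?).getD a := by
  cases l with
  | nil => rfl
  | cons b m => simp [List.getLast?_cons]

theorem pickA_char (min_credits : Int) :
    ∀ (l : List (List (String × Int))) (t : Int), t < min_credits →
      pickA_go min_credits l [] t =
        match firstHit min_credits (pickB_prefix l t) with
        | some p => (l.take (p.1 + 1), p.2)
        | none => (l, ((pickB_prefix l t).getLast?).getD t) := by
  intro l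
  induction l with
  | nil => intro t ht; simp [pickA_go, pickB_prefix, firstHit]
  | cons c rest ih =>
      intro t ht
      have hlt : ¬ t ≥ min_credits := by omega
      simp only [pickA_go, if_neg hlt]
      rw [pickA_go_acc min_credits rest ([] ++ [c]) (t + pvCredits c)]
      simp only [pickB_prefix, firstHit]
      by_cases h2 : t + pvCredits c ≥ min_credits
      · rw [pickA_stop _ _ _ h2]
        simp [h2]
      · rw [ih (t + pvCredits c) (by omega)]
        simp only [if_neg h2]
        cases hfh : firstHit min_credits (pickB_prefix rest (t + pvCredits c)) with
        | some p => simp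
        | none => simp [lastD_cons]

theorem pick_courses_for_group_spec : Claim_equal_pick_courses_for_group := by
  intro courses min_credits _dom _pre
  unfold Spec_pick_courses_for_group pick_courses_for_group pick_courses_for_group_alt
  by_cases hm : min_credits ≤ 0
  · rw [pickA_stop _ _ _ (by omega)]
    simp [hm]
  · simp only [if_neg hm]
    rw [pickA_char min_credits courses 0 (by omega)]
    rw [pickB_scan_eq_firstHit courses min_credits (pickB_prefix courses 0) 0]
    cases hfh : firstHit min_credits (pickB_prefix courses 0) with
    | none => simp
    | some p =>
        simp only [Option.map_some]
        rw [PySem.List.slice_zero_start]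
        have hb : (0 : Int) + (p.1 : Int) + 1 = ((p.1 + 1 : Nat) : Int) := by push_cast; ring
        rw [hb, PySem.List.slice_to_natCast]
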